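-- pv_equiv track=rewrite | github.com/paul-heyse/CodeAnatomy | tools/cq/macros/calls/context_snippet.py | _render_selected_context_lines
-- ===== SOURCE A (Python) =====
-- def _render_selected_context_lines(source_lines: list[str], selected: list[int]) -> list[str]:
--     if not selected:
--         return []
--     rendered: list[str] = []
--     previous: int | None = None
--     for idx in selected:
--         if previous is not None and idx - previous > 1:
--             omitted = idx - previous - 1
--             rendered.append(f"    # ... omitted ({omitted} lines) ...")
--         rendered.append(source_lines[idx])
--         previous = idx
--     return rendered
-- ===== SOURCE B (Python) =====
-- def _render_selected_context_lines(source_lines: list[str], selected: list[int]) -> list[str]: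
--     if not selected:
--         return []
--     # Pass 1: group `selected` into maximal runs of near-consecutive indices.
--     runs: list[list[int]] = []
--     current: list[int] = [selected[0]]
--     for idx in selected[1:]:
--         if idx - current[-1] <= 1:
--             current.append(idx)
--         else:
--             runs.append(current)
--             current = [idx]
--     runs.append(current)
--     # Pass 2: emit each run, with an omission marker between runs.
--     rendered: list[str] = []
--     previous_end: int | None = None
--     for run in runs:
--         if previous_end is not None:
--             omitted = run[0] - previous_end - 1
--             rendered.append(f"    # ... omitted ({omitted} lines) ...")
--         rendered.extend(source_lines[i] for i in run)
--         previous_end = run[-1]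
--     return rendered
-- ===== Notes on version B (the rewrite author's own statement) =====
-- stated objective: alternative
-- what changed: B first partitions `selected` into maximal runs of near-consecutive indices (an explicit intermediate list of runs), then a second pass emits each run in one go with an omission marker between runs, instead of A's single pass with a scalar `previous` and an inline gap check.
import Mathlib
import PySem

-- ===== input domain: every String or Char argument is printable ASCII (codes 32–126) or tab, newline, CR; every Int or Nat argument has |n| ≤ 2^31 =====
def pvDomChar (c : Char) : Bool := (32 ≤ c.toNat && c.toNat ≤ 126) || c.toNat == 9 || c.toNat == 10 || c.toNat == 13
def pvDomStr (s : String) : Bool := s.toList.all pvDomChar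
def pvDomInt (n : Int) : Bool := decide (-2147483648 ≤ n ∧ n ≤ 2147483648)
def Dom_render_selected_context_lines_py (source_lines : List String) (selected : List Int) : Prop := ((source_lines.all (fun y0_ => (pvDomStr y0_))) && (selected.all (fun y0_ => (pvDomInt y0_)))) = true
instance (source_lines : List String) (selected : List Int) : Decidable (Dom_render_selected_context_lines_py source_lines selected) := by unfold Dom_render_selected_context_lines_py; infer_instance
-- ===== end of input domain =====

-- B groups `selected` into maximal runs and emits run-by-run, instead of A's single scan
-- with a scalar `previous`; same O(n) cost, different decomposition (objective: alternative).

-- ===== PORT A =====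
-- shared helpers: the f-string marker and the `source_lines[idx]` access (total under Pre_)
def pvMarker (omitted : Int) : String :=
  "    # ... omitted (" ++ PySem.Int.toStr omitted ++ " lines) ..."
def pvLine (source_lines : List String) (idx : Int) : String :=
  (PySem.List.pyGet? source_lines idx).getD ""

-- A's loop body: marker on a gap > 1 from the previous index, then the line itself
def pvStepA (source_lines : List String) (st : List String × Option Int) (idx : Int) :
    List String × Option Int :=
  let rendered :=
    match st.2 with
    | some previous =>
        if idx - previous > 1 then st.1 ++ [pvMarker (idx - previous - 1)] else st.1
    | none => st.1
  (rendered ++ [pvLine source_lines idx], some idx)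

def render_selected_context_lines_py (source_lines : List String) (selected : List Int) :
    List String :=
  if selected.isEmpty then []
  else (selected.foldl (pvStepA source_lines) ([], none)).1

-- ===== PORT B =====
-- Pass 1 body: extend the current run while the gap is ≤ 1, else close it
def pvStepBuild (st : List (List Int) × List Int) (idx : Int) : List (List Int) × List Int :=
  if idx - (st.2.getLast?.getD 0) ≤ 1 then (st.1, st.2 ++ [idx]) else (st.1 ++ [st.2], [idx])

-- Pass 2 body: marker between runs, then all of the run's lines
def pvStepEmit (source_lines : List String) (st : List String × Option Int) (run : List Int) :
    List String × Option Int :=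
  let rendered :=
    match st.2 with
    | some previousEnd => st.1 ++ [pvMarker (run.head?.getD 0 - previousEnd - 1)]
    | none => st.1
  (rendered ++ run.map (pvLine source_lines), some (run.getLast?.getD 0))

def render_selected_context_lines_py_alt (source_lines : List String) (selected : List Int) :
    List String :=
  match selected with
  | [] => []
  | first :: rest =>
    let built := rest.foldl pvStepBuild ([], [first])
    let runs := built.1 ++ [built.2]
    (runs.foldl (pvStepEmit source_lines) ([], none)).1

-- ===== PRECONDITION & SPEC =====
-- Pre_ excludes exactly the inputs where Python's `source_lines[idx]` raises IndexError.
def Pre_render_selected_context_lines_py (source_lines : List String) (selected : List Int) : Prop :=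
  ∀ i ∈ selected, PySem.Raise.InRange source_lines.length i
instance (source_lines : List String) (selected : List Int) :
    Decidable (Pre_render_selected_context_lines_py source_lines selected) := by
  unfold Pre_render_selected_context_lines_py; infer_instance

def pvWitness_render_selected_context_lines_py : List String × List Int :=
  (["a", "b", "c", "d"], [0, 3])

def Spec_render_selected_context_lines_py (source_lines : List String) (selected : List Int) (out : List String) : Prop := out = render_selected_context_lines_py_alt source_lines selected
instance (source_lines : List String) (selected : List Int) (out : List String) : Decidable (Spec_render_selected_context_lines_py source_lines selected out) := by unfold Spec_render_selected_context_lines_py; infer_instance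

-- ===== CLAIM (what is proved, stated in full; the proofs are below) =====
def Claim_equal_render_selected_context_lines_py : Prop := ∀ (source_lines : List String) (selected : List Int), Dom_render_selected_context_lines_py source_lines selected → Pre_render_selected_context_lines_py source_lines selected → Spec_render_selected_context_lines_py source_lines selected (render_selected_context_lines_py source_lines selected)

-- ===== LEMMAS AND PROOFS =====

-- the emit fold over `runs ++ [c]` is the emit fold over `runs` followed by one emit step
theorem pvEmit_append_one (src : List String) (rs : List (List Int)) (c : List Int) :
    (rs ++ [c]).foldl (pvStepEmit src) ([], none) =
      pvStepEmit src (rs.foldl (pvStepEmit src) ([], none)) c := by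
  simp [List.foldl_append]

-- core invariant: running B's build fold from (runs, c :: cs) and then emitting equals
-- continuing A's fold from the state A would have after emitting `runs ++ [c :: cs]`
theorem pvCore (src : List String) :
    ∀ (l : List Int) (runs : List (List Int)) (c : Int) (cs : List Int),
      ((l.foldl pvStepBuild (runs, c :: cs)).1 ++
          [(l.foldl pvStepBuild (runs, c :: cs)).2]).foldl (pvStepEmit src) ([], none) =
      l.foldl (pvStepA src) ((runs ++ [c :: cs]).foldl (pvStepEmit src) ([], none)) := by
  intro l
  induction l with
  | nil => intro runs c cs; rfl
  | cons a l ih =>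
    intro runs c cs
    by_cases h : a - ((c :: cs).getLast?.getD 0) ≤ 1
    · have hb : pvStepBuild (runs, c :: cs) a = (runs, c :: (cs ++ [a])) := by
        simp [pvStepBuild, h]
      have hlast : (c :: (cs ++ [a])).getLast?.getD 0 = a := by
        rw [← List.cons_append, List.getLast?_concat]; rfl
      have hstep :
          pvStepEmit src (runs.foldl (pvStepEmit src) ([], none)) (c :: (cs ++ [a])) =
            pvStepA src (pvStepEmit src (runs.foldl (pvStepEmit src) ([], none)) (c :: cs)) a := by
        simp [pvStepEmit, pvStepA, pvLine, not_lt.mpr h, hlast]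
      simp only [List.foldl_cons, hb]
      rw [ih runs c (cs ++ [a]), pvEmit_append_one, pvEmit_append_one, hstep]
    · have hb : pvStepBuild (runs, c :: cs) a = (runs ++ [c :: cs], [a]) := by
        simp [pvStepBuild, h]
      have hstep :
          pvStepEmit src ((runs ++ [c :: cs]).foldl (pvStepEmit src) ([], none)) [a] =
            pvStepA src ((runs ++ [c :: cs]).foldl (pvStepEmit src) ([], none)) a := by
        rw [pvEmit_append_one]
        simp [pvStepEmit, pvStepA, pvLine, lt_of_not_ge h]
      simp only [List.foldl_cons, hb]
      rw [ih (runs ++ [c :: cs]) a [], pvEmit_append_one, hstep]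

-- ===== VERDICT (by name: the statement is the Claim_ definition above) =====
theorem render_selected_context_lines_py_spec : Claim_equal_render_selected_context_lines_py := by
  intro src sel _ _
  unfold Spec_render_selected_context_lines_py
  cases sel with
  | nil => rfl
  | cons x rest =>
    show (render_selected_context_lines_py src (x :: rest)) = _
    have h := pvCore src rest [] x []
    simp only [List.nil_append] at h
    simp only [render_selected_context_lines_py, render_selected_context_lines_py_alt,
      List.isEmpty_cons, List.foldl_cons]
    rw [h]
    rfl
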